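-- pv_equiv track=rewrite | github.com/kolai23/TMS_DevOps_courses | hw24/subnet_unittest/subnet_calc.py | list_print
-- ===== SOURCE A (Python) =====
-- def list_print(in_list):
--     string = ''
--     count =0
--     for pr_list in in_list:
--         string +=str(pr_list)
--         count+=1
--         if count <= 3:
--             string+='.'
--     return string
-- ===== SOURCE B (Python) =====
-- def list_print(in_list):
--     items = list(in_list)
--     return ''.join(str(x) + '.' for x in items[:3]) + ''.join(str(x) for x in items[3:])
-- ===== Notes on version B (the rewrite author's own statement) =====
-- stated objective: simpler
-- what changed: Replaces the single counting loop with conditional dot-appending by slicing into the first three elements (each joined with a trailing dot) and the rest (joined with no separator), two shaped joins with no counter state.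
import Mathlib
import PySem

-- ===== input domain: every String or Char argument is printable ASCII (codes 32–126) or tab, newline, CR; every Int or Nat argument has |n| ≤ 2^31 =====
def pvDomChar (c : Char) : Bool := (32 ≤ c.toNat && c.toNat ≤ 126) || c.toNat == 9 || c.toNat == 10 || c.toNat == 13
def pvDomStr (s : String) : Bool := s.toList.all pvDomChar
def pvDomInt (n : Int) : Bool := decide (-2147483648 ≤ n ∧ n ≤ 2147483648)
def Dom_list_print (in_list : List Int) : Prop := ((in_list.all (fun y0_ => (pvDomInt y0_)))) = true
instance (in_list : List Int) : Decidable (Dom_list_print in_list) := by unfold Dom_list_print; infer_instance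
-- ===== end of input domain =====

-- B joins the first three elements each with a trailing dot and concatenates the rest
-- separator-free (two shaped passes over slices), instead of A's counting loop; objective: simpler.

-- ===== PORT A =====
-- literal port of A's loop: state (string, count), dot appended while count ≤ 3
def list_print (in_list : List Int) : String :=
  (in_list.foldl (fun (st : String × Int) pr_list =>
      let s := st.1 ++ PySem.Int.toStr pr_list
      let c := st.2 + 1
      (if c ≤ 3 then s ++ "." else s, c)) ("", 0)).1

-- ===== PORT B =====
def list_print_alt (in_list : List Int) : String :=
  String.join ((in_list.take 3).map (fun x => PySem.Int.toStr x ++ ".")) ++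
  String.join ((in_list.drop 3).map (fun x => PySem.Int.toStr x))

-- ===== PRECONDITION & SPEC =====
def Spec_list_print (in_list : List Int) (out : String) : Prop := out = list_print_alt in_list
instance (in_list : List Int) (out : String) : Decidable (Spec_list_print in_list out) := by unfold Spec_list_print; infer_instance

-- ===== CLAIM (what is proved, stated in full; the proofs are below) =====
def Claim_equal_list_print : Prop := ∀ (in_list : List Int), Dom_list_print in_list → Spec_list_print in_list (list_print in_list)

-- ===== LEMMAS AND PROOFS =====

-- String.join distributes over cons
theorem join_cons (a : String) (l : List String) :
    String.join (a :: l) = a ++ String.join l := by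
  have gen : ∀ (l : List String) (s : String),
      List.foldl (fun r t => r ++ t) s l = s ++ String.join l := by
    intro l
    induction l with
    | nil => intro s; simp [String.join]
    | cons b t ih =>
      intro s
      simp only [String.join, List.foldl_cons] at *
      rw [ih (s ++ b), ih ("" ++ b)]
      simp [String.append_assoc]
  simp only [String.join, List.foldl_cons]
  rw [gen l ("" ++ a)]
  simp [String.join]

-- once the counter is past 3, the loop only concatenates the string representations
theorem list_print_tail (l : List Int) (s : String) (c : Int) (hc : 3 ≤ c) :
    (l.foldl (fun (st : String × Int) pr_list =>
      let s := st.1 ++ PySem.Int.toStr pr_list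
      let c := st.2 + 1
      (if c ≤ 3 then s ++ "." else s, c)) (s, c)).1
    = s ++ String.join (l.map (fun x => PySem.Int.toStr x)) := by
  induction l generalizing s c with
  | nil => simp [String.join]
  | cons a t ih =>
    simp only [List.foldl_cons, List.map_cons]
    rw [if_neg (by omega)]
    rw [ih (s ++ PySem.Int.toStr a) (c + 1) (by omega), join_cons]
    simp [String.append_assoc]

-- while the counter has budget k = 3 - c left, the loop dots the next k elements
-- and then concatenates the rest undotted
theorem list_print_head (l : List Int) (s : String) (k : Nat) (hk : k ≤ 3) :
    (l.foldl (fun (st : String × Int) pr_list =>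
      let s := st.1 ++ PySem.Int.toStr pr_list
      let c := st.2 + 1
      (if c ≤ 3 then s ++ "." else s, c)) (s, 3 - (k : Int))).1
    = s ++ String.join ((l.take k).map (fun x => PySem.Int.toStr x ++ "."))
        ++ String.join ((l.drop k).map (fun x => PySem.Int.toStr x)) := by
  induction l generalizing s k with
  | nil => simp [String.join]
  | cons a t ih =>
    cases k with
    | zero =>
      simp only [List.foldl_cons, List.take_zero, List.drop_zero, List.map_nil,
        List.map_cons, Nat.cast_zero]
      rw [if_neg (by omega)]
      rw [show (3 : Int) - 0 + 1 = 3 + 1 from by ring]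
      rw [list_print_tail t (s ++ PySem.Int.toStr a) (3 + 1) (by omega), join_cons]
      simp [String.join, String.append_assoc]
    | succ j =>
      simp only [List.foldl_cons, List.take_succ_cons, List.drop_succ_cons,
        List.map_cons]
      rw [if_pos (by omega)]
      rw [show (3 : Int) - (↑(j + 1) : Int) + 1 = 3 - (j : Int) from by push_cast; ring]
      rw [ih (s ++ PySem.Int.toStr a ++ ".") j (by omega), join_cons]
      simp [String.append_assoc]

-- ===== VERDICT (by name: the statement is the Claim_ definition above) =====
theorem list_print_spec : Claim_equal_list_print := by
  intro in_list _
  unfold Spec_list_print list_print list_print_alt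
  have h := list_print_head in_list "" 3 (by omega)
  rw [show (3 : Int) - ((3 : Nat) : Int) = 0 from by norm_num] at h
  rw [h]
  simp
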